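-- pv_equiv track=rewrite | github.com/skysign/WSAPT | 2023 KAKAO BLIND RECRUITMENT 1,2,3 떨어트리기/main.py | make_target_from123
-- ===== SOURCE A (Python) =====
-- def make_target_from123(length123: int, target: int):
--     num123 = 3
--     answer = []
--
--     while target > 0:
--         if length123 - 1 <= target - num123 <= (length123 - 1) * 3:
--             answer.append(num123)
--             target -= num123
--             length123 -= 1
--         else:
--             num123 -= 1
--
--     answer.sort()
--     return answer
-- ===== SOURCE B (Python) =====
-- def make_target_from123(length123: int, target: int):
--     # Closed-form digit counts instead of a greedy loop + sort.
--     if target <= 0: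
--         return []
--     extra = target - length123
--     threes = extra // 2
--     twos = extra % 2
--     ones = length123 - threes - twos
--     return [1] * ones + [2] * twos + [3] * threes
-- ===== Notes on version B (the rewrite author's own statement) =====
-- stated objective: simpler
-- what changed: Replaces the greedy digit-by-digit while loop followed by a sort with closed-form digit counts (extra//2 threes, extra%2 twos, remaining ones) and direct construction of the already-sorted list.
import Mathlib
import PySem

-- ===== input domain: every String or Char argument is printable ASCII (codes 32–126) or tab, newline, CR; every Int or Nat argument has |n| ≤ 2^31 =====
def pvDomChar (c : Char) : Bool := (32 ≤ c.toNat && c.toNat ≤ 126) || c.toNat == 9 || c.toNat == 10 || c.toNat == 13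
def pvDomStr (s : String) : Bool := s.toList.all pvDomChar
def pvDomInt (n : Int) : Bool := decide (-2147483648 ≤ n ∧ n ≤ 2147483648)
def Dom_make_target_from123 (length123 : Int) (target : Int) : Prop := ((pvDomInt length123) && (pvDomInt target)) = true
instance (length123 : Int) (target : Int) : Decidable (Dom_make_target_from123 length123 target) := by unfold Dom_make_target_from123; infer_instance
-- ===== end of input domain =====

-- B replaces A's greedy while-loop + sort with closed-form digit counts; claimed equal on Pre_ (where A terminates).

-- ===== PORT A =====
-- A's while loop, transliterated with fuel (the loop does not terminate for target > 0
-- outside length123 ≤ target ≤ 3*length123; Pre_ excludes exactly those inputs, and on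
-- Pre_ the fuel target.toNat + 3 is proved sufficient, so the port computes A's value).
def mtLoopA (fuel : Nat) (num123 target length123 : Int) (answer : List Int) : List Int :=
  match fuel with
  | 0 => answer
  | fuel + 1 =>
    if target > 0 then
      if length123 - 1 ≤ target - num123 ∧ target - num123 ≤ (length123 - 1) * 3 then
        mtLoopA fuel num123 (target - num123) (length123 - 1) (answer ++ [num123])
      else
        mtLoopA fuel (num123 - 1) target length123 answer
    else answer

def make_target_from123 (length123 : Int) (target : Int) : List Int :=
  PySem.List.sorted (mtLoopA (target.toNat + 3) 3 target length123 []) (fun x => x) false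

-- ===== PORT B =====
def make_target_from123_alt (length123 : Int) (target : Int) : List Int :=
  if target ≤ 0 then []
  else
    let extra := target - length123
    let threes := PySem.Int.floordiv extra 2
    let twos := PySem.Int.mod extra 2
    let ones := length123 - threes - twos
    List.replicate ones.toNat 1 ++ List.replicate twos.toNat 2 ++ List.replicate threes.toNat 3

-- ===== PRECONDITION & SPEC =====
-- Pre_ excludes exactly the inputs on which A's while loop never terminates:
-- target > 0 with target outside [length123, 3*length123] (num123 decreases forever).
def Pre_make_target_from123 (length123 : Int) (target : Int) : Prop :=
  target ≤ 0 ∨ (length123 ≤ target ∧ target ≤ 3 * length123)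
instance (length123 : Int) (target : Int) : Decidable (Pre_make_target_from123 length123 target) := by unfold Pre_make_target_from123; infer_instance
def pvWitness_make_target_from123 : Int × Int := (4, 9)

def Spec_make_target_from123 (length123 : Int) (target : Int) (out : List Int) : Prop := out = make_target_from123_alt length123 target
instance (length123 : Int) (target : Int) (out : List Int) : Decidable (Spec_make_target_from123 length123 target out) := by unfold Spec_make_target_from123; infer_instance

-- ===== CLAIM (what is proved, stated in full; the proofs are below) =====
def Claim_equal_make_target_from123 : Prop := ∀ (length123 : Int) (target : Int), Dom_make_target_from123 length123 target → Pre_make_target_from123 length123 target → Spec_make_target_from123 length123 target (make_target_from123 length123 target)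

-- ===== LEMMAS AND PROOFS =====

-- num123 = 1 phase: target = length123 ≥ 0, appends target ones.
theorem mtLoopA_one (fuel : Nat) : ∀ (t : Int) (acc : List Int),
    0 ≤ t → t.toNat + 1 ≤ fuel →
    mtLoopA fuel 1 t t acc = acc ++ List.replicate t.toNat 1 := by
  induction fuel with
  | zero => intro t acc h hf; omega
  | succ n ih =>
    intro t acc h hf
    by_cases ht : t > 0
    · have hc : t - 1 ≤ t - 1 ∧ t - 1 ≤ (t - 1) * 3 := by constructor <;> nlinarith
      rw [mtLoopA, if_pos ht, if_pos hc, ih (t - 1) (acc ++ [1]) (by omega) (by omega)]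
      have hn : t.toNat = (t - 1).toNat + 1 := by omega
      rw [hn, List.replicate_succ]
      simp
    · have ht0 : t = 0 := by omega
      subst ht0
      simp [mtLoopA]

-- num123 = 2 phase with extra = 0: falls through to the ones phase.
theorem mtLoopA_two_zero (fuel : Nat) (t : Int) (acc : List Int)
    (h : 0 ≤ t) (hf : t.toNat + 2 ≤ fuel) :
    mtLoopA fuel 2 t t acc = acc ++ List.replicate t.toNat 1 := by
  by_cases ht : t > 0
  · match fuel, hf with
    | n + 1, _ =>
      have hc : ¬ (t - 1 ≤ t - 2 ∧ t - 2 ≤ (t - 1) * 3) := by omega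
      rw [mtLoopA, if_pos ht, if_neg hc, (by norm_num : (2:Int) - 1 = 1)]
      exact mtLoopA_one n t acc h (by omega)
  · have ht0 : t = 0 := by omega
    subst ht0
    match fuel, hf with
    | n + 1, _ => simp [mtLoopA]

-- num123 = 2 phase with extra = 1 (needs length123 ≥ 1): one two, then ones.
theorem mtLoopA_two_one (fuel : Nat) (L : Int) (acc : List Int)
    (h : 1 ≤ L) (hf : (L - 1).toNat + 3 ≤ fuel) :
    mtLoopA fuel 2 (L + 1) L acc = acc ++ 2 :: List.replicate (L - 1).toNat 1 := by
  match fuel, hf with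
  | n + 1, _ =>
    have ht : L + 1 > 0 := by omega
    have hc : L - 1 ≤ L + 1 - 2 ∧ L + 1 - 2 ≤ (L - 1) * 3 := by constructor <;> nlinarith
    rw [mtLoopA, if_pos ht, if_pos hc, (by ring : L + 1 - 2 = L - 1)]
    rw [mtLoopA_two_zero n (L - 1) (acc ++ [2]) (by omega) (by omega)]
    simp

-- num123 = 3 phase: greedy under the invariant length123 ≤ target ≤ 3 * length123.
theorem mtLoopA_three (fuel : Nat) : ∀ (t L : Int) (acc : List Int),
    L ≤ t → t ≤ 3 * L → t.toNat + 3 ≤ fuel →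
    mtLoopA fuel 3 t L acc =
      acc ++ List.replicate ((t - L) / 2).toNat 3 ++
        (if (t - L) % 2 = 1 then 2 :: List.replicate (L - (t - L) / 2 - 1).toNat 1
         else List.replicate (L - (t - L) / 2).toNat 1) := by
  induction fuel with
  | zero => intro t L acc h1 h2 hf; omega
  | succ n ih =>
    intro t L acc h1 h2 hf
    by_cases hge : 2 ≤ t - L
    · -- take a 3
      have ht : t > 0 := by omega
      have hc : L - 1 ≤ t - 3 ∧ t - 3 ≤ (L - 1) * 3 := by constructor <;> omega
      rw [mtLoopA, if_pos ht, if_pos hc]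
      rw [ih (t - 3) (L - 1) (acc ++ [3]) (by omega) (by omega) (by omega)]
      rw [(by ring : t - 3 - (L - 1) = t - L - 2)]
      rw [(by omega : (t - L - 2) % 2 = (t - L) % 2)]
      rw [(by omega : ((t - L) / 2).toNat = ((t - L - 2) / 2).toNat + 1)]
      rw [(by omega : L - 1 - (t - L - 2) / 2 - 1 = L - (t - L) / 2 - 1)]
      rw [(by omega : L - 1 - (t - L - 2) / 2 = L - (t - L) / 2)]
      rw [List.replicate_succ]
      simp
    · -- extra is 0 or 1: the num123 = 3 condition fails
      by_cases ht : t > 0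
      · have hc : ¬ (L - 1 ≤ t - 3 ∧ t - 3 ≤ (L - 1) * 3) := by omega
        rw [mtLoopA, if_pos ht, if_neg hc, (by norm_num : (3:Int) - 1 = 2)]
        by_cases he1 : t - L = 1
        · have hL1 : 1 ≤ L := by omega
          have htL : t = L + 1 := by omega
          rw [htL, mtLoopA_two_one n L acc hL1 (by omega)]
          rw [(by ring : L + 1 - L = (1:Int))]
          norm_num
        · have htL : t = L := by omega
          rw [htL, mtLoopA_two_zero n L acc (by omega) (by omega)]
          rw [(by ring : L - L = (0:Int))]
          norm_num
      · have ht0 : t = 0 := by omega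
        have hL0 : L = 0 := by omega
        rw [mtLoopA, if_neg ht]
        subst ht0
        subst hL0
        norm_num

-- every block of equal digits is ≤-sorted
theorem pairwise_le_replicate (n : Nat) (a : Int) :
    (List.replicate n a).Pairwise (fun x1 x2 => x1 ≤ x2) := by
  induction n with
  | zero => simp
  | succ m ih =>
    rw [List.replicate_succ, List.pairwise_cons]
    exact ⟨fun b hb => le_of_eq (List.eq_of_mem_replicate hb).symm, ih⟩

-- main equivalence on Pre_
theorem make_target_eq (length123 target : Int)
    (hpre : Pre_make_target_from123 length123 target) :
    make_target_from123 length123 target = make_target_from123_alt length123 target := by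
  by_cases ht0 : target ≤ 0
  · have ht : ¬ target > 0 := by omega
    unfold make_target_from123 make_target_from123_alt
    rw [if_pos ht0, mtLoopA, if_neg ht]
    rfl
  · rcases hpre with hle | ⟨h1, h2⟩
    · omega
    · unfold make_target_from123
      rw [mtLoopA_three (target.toNat + 3) target length123 [] h1 h2 (le_refl _)]
      have he0 : 0 ≤ target - length123 := by omega
      have hB : make_target_from123_alt length123 target =
          List.replicate (length123 - (target - length123) / 2 - (target - length123) % 2).toNat 1 ++
            List.replicate ((target - length123) % 2).toNat 2 ++
            List.replicate ((target - length123) / 2).toNat 3 := by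
        simp only [make_target_from123_alt, if_neg ht0,
          PySem.Int.floordiv_eq_ediv_of_pos (by norm_num : (0:Int) < 2),
          PySem.Int.mod_eq_emod_of_pos (by norm_num : (0:Int) < 2)]
      rw [hB]
      apply PySem.List.sorted_id_eq_of_perm_of_pairwise
      · -- B's list is a permutation of the raw loop output
        by_cases hodd : (target - length123) % 2 = 1
        · rw [if_pos hodd, hodd]
          rw [(by omega : (length123 - (target - length123) / 2 - 1).toNat
                = (length123 - (target - length123) / 2 - (target - length123) % 2).toNat)]
          rw [(by rfl : ((1:Int)).toNat = 1), List.replicate_one, List.nil_append]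
          refine (List.perm_append_comm).trans ?_
          exact List.Perm.append_left _ List.perm_append_comm
        · have hm0 : (target - length123) % 2 = 0 := by omega
          rw [if_neg hodd, hm0]
          simp only [Int.toNat_zero, List.replicate_zero, List.append_nil,
            List.nil_append, sub_zero]
          exact List.perm_append_comm
      · -- B's list is ≤-sorted
        rw [List.pairwise_append, List.pairwise_append]
        refine ⟨⟨pairwise_le_replicate _ _, pairwise_le_replicate _ _, ?_⟩,
          pairwise_le_replicate _ _, ?_⟩
        · intro a ha b hb
          rw [List.eq_of_mem_replicate ha, List.eq_of_mem_replicate hb]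
          norm_num
        · intro a ha b hb
          rw [List.eq_of_mem_replicate hb]
          rcases List.mem_append.1 ha with h | h <;>
            rw [List.eq_of_mem_replicate h] <;> norm_num

-- ===== VERDICT (by name: the statement is the Claim_ definition above) =====
theorem make_target_from123_spec : Claim_equal_make_target_from123 := by
  intro length123 target _ hpre
  exact make_target_eq length123 target hpre
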